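-- pv_equiv track=rewrite | github.com/ai-kmu/etc | algorithm/2025/0825_Bulb_Switcher_II/Taejin.py | flipLights
-- ===== SOURCE A (Python) =====
-- def flipLights(n: int, presses: int) -> int:
--     # zero index 기준
--     # Button 1 : j = k -> if j (mod 1) = 0 Flip
--     # Button 2 : j = 2k + 1 -> if j (mod 2) = 1 Flip
--     # Button 3 : j = 2k -> if j (mod 2) = 0 Flip
--     # Button 4 : j = 3k -> if j (mod 3) = 0 Flip
--
--     # 1, 2, 3의 lcm으로 변환
--     # Button 1 : 6k, 6k + 1, 6k + 2, 6k + 3, 6k + 4, 6k + 5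
--     # Button 2 : 6k + 1, 6k + 3, 6k + 5
--     # Button 3 : 6k, 6k + 2, 6k + 4
--     # Button 4 : 6k, 6k + 3
--
--     # 6마다 반복 -> 최대 6자리
--     n = min(n, 6)
--
--     # presses : 4번이 최대 선택 경우 (이후는 중복이기 때문)
--     # 순서 중요하지 않음
--     # presses : 0 -> 1
--     # presses : 1 -> 4
--     # presses : 2 -> 1(0번) + 6 = 7
--     # presses : 3 -> 4(1번) + 4 = 8
--     # presses : 4 -> 7(2번) + 1 = 8
--     # presses : 5 -> 8(3번)
--     # presses : 6 -> 8(4번)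
--     # presses : 7 -> 8(3번)
--     # presses : 8 -> 8(4번)
--     presses = min(presses, (presses - 1) % 2 + 3)
--
--     # bit 연산(xor) 활용1 : 최대자리(6)의 버튼 On/Off
--     # btn1 : ^ int("111111", 2)
--     # btn2 : ^ int("010101", 2)
--     # btn3 : ^ int("101010", 2)
--     # btn4 : ^ int("100100", 2)
--     btn1 = int("111111"[:n], 2)
--     btn2 = int("010101"[:n], 2)
--     btn3 = int("101010"[:n], 2)
--     btn4 = int("100100"[:n], 2)
--
--     # btn_map으로 press별 btn_mask 정의, 최대 2^4 경우.
--     btn_map = [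
--         [0], # press 0
--         [btn1, btn2, btn3, btn4], # press 1
--         [btn1 ^ btn2, btn1 ^ btn3, btn1 ^ btn4, btn2 ^ btn3, btn2 ^ btn4, btn3 ^ btn4], # press 2
--         [btn1 ^ btn2 ^ btn3, btn1 ^ btn2 ^ btn4, btn1 ^ btn3 ^ btn4, btn2 ^ btn3 ^ btn4], # press 3
--         [btn1 ^ btn2 ^ btn3 ^ btn4], # press 4 -> bnt4와 동일
--     ]
--
--     flips = []
--
--     while presses >= 0:
--         for btn_mask in btn_map[presses]:
--             flip = int("111111"[:n], 2) ^ btn_mask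
--
--             if flip not in flips:
--                 flips.append(flip)
--
--         presses -= 2
--
--     return len(flips)
-- ===== SOURCE B (Python) =====
-- def flipLights(n: int, presses: int) -> int:
--     # Closed form: the answer only depends on min(n, 3) and min(presses, 3)
--     # (and presses < 0, where no state is ever produced).
--     if presses < 0:
--         return 0
--     m = min(n, 3)
--     if presses == 0 or m <= 0:
--         return 1
--     if m == 1:
--         return 2
--     if m == 2:
--         return 3 if presses == 1 else 4
--     return 4 if presses == 1 else (7 if presses == 2 else 8)
-- ===== Notes on version B (the rewrite author's own statement) =====
-- stated objective: simpler
-- what changed: Replaces A's xor-mask table, parity while-loop and list-scan dedup by the closed-form answer: the count only depends on min(n,3) and min(presses,3), returned directly from a chain of comparisons with no enumeration at all.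
-- outside the precondition, e.g. on flipLights(-3, 2): A returns 7, B returns 1; on flipLights(-5, 1): A returns 2, B returns 1; on flipLights(0, 2): A raises ValueError, B returns 1
import Mathlib
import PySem

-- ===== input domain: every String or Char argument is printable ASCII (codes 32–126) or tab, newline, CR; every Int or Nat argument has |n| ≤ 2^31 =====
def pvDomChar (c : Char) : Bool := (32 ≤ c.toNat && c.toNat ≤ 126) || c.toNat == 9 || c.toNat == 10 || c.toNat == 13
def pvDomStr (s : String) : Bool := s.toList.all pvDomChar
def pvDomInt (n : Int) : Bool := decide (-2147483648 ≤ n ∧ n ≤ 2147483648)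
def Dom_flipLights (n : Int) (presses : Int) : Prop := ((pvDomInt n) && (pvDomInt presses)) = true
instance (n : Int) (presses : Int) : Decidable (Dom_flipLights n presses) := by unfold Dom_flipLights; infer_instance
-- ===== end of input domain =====

-- B replaces A's xor-mask table + parity while-loop + list dedup by the closed-form answer
-- determined by min(n,3) and min(presses,3) (objective: simpler).


-- ===== PORT A =====
-- int("111111"[:n], 2): ofCharsBase? is none exactly where Python raises ValueError (empty slice,
-- i.e. n = 0 or n ≤ -6); those inputs are excluded by Pre_flipLights, the .getD 0 is never the value.
def pvMask (n : Int) (pattern : List Char) : Int :=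
  (PySem.Int.ofCharsBase? (PySem.List.slice pattern none (some n)) 2).getD 0

-- the while-loop: 'while presses >= 0: for btn_mask in btn_map[presses]: …; presses -= 2'
-- (fuel only makes it total; the caller passes enough fuel for every run, see flipLights)
def flipLoop : Nat → List (List Int) → Int → Int → List Int → List Int
  | 0, _, _, _, flips => flips
  | fuel + 1, btnMap, allMask, presses, flips =>
    if 0 ≤ presses then
      flipLoop fuel btnMap allMask (presses - 2)
        ((PySem.List.pyGetD btnMap presses []).foldl
          (fun fl btnMask =>
            -- flip = int("111111"[:n], 2) ^ btn_mask   (Python recomputes the same constant, = allMask)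
            let flip := PySem.Int.bxor allMask btnMask
            if fl.contains flip then fl else fl ++ [flip]) flips)
    else flips

-- body after the two rebindings n = min(n, 6), presses = min(presses, (presses - 1) % 2 + 3)
def flipCore (n : Int) (presses : Int) : Int :=
  let btn1 := pvMask n ['1','1','1','1','1','1']
  let btn2 := pvMask n ['0','1','0','1','0','1']
  let btn3 := pvMask n ['1','0','1','0','1','0']
  let btn4 := pvMask n ['1','0','0','1','0','0']
  let btnMap : List (List Int) :=
    [[0],
     [btn1, btn2, btn3, btn4],
     [PySem.Int.bxor btn1 btn2, PySem.Int.bxor btn1 btn3, PySem.Int.bxor btn1 btn4,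
      PySem.Int.bxor btn2 btn3, PySem.Int.bxor btn2 btn4, PySem.Int.bxor btn3 btn4],
     [PySem.Int.bxor (PySem.Int.bxor btn1 btn2) btn3, PySem.Int.bxor (PySem.Int.bxor btn1 btn2) btn4,
      PySem.Int.bxor (PySem.Int.bxor btn1 btn3) btn4, PySem.Int.bxor (PySem.Int.bxor btn2 btn3) btn4],
     [PySem.Int.bxor (PySem.Int.bxor (PySem.Int.bxor btn1 btn2) btn3) btn4]]
  ((flipLoop (presses + 2).toNat btnMap btn1 presses []).length : Int)

def flipLights (n : Int) (presses : Int) : Int :=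
  flipCore (min n 6) (min presses (PySem.Int.mod (presses - 1) 2 + 3))

-- ===== PORT B =====
def flipLights_alt (n : Int) (presses : Int) : Int :=
  if presses < 0 then 0
  else
    let m := min n 3
    if presses = 0 ∨ m ≤ 0 then 1
    else if m = 1 then 2
    else if m = 2 then (if presses = 1 then 3 else 4)
    else if presses = 1 then 4 else if presses = 2 then 7 else 8

-- ===== PRECONDITION & SPEC =====
-- Pre_ excludes n ≤ 0, outside the natural bulb-count domain: A raises ValueError (int('', 2) on
-- the empty slice) for n = 0 and n ≤ -6, and for -5 ≤ n ≤ -1 A's value is an accident of Python's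
-- negative-slice wraparound, which treats n as a count of 6+n bulbs.
def Pre_flipLights (n : Int) (presses : Int) : Prop := 1 ≤ n
instance (n : Int) (presses : Int) : Decidable (Pre_flipLights n presses) := by
  unfold Pre_flipLights; infer_instance

def pvWitness_flipLights : Int × Int := (3, 2)

def Spec_flipLights (n : Int) (presses : Int) (out : Int) : Prop := out = flipLights_alt n presses
instance (n : Int) (presses : Int) (out : Int) : Decidable (Spec_flipLights n presses out) := by
  unfold Spec_flipLights; infer_instance

-- ===== CLAIM (what is proved, stated in full; the proofs are below) =====
def Claim_equal_flipLights : Prop := ∀ (n : Int) (presses : Int), Dom_flipLights n presses → Pre_flipLights n presses → Spec_flipLights n presses (flipLights n presses)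

-- ===== LEMMAS AND PROOFS =====

-- canonical representative of presses: both programs only see presses through this class
def pvNormP (p : Int) : Int :=
  if p < 0 then -1 else if p ≤ 4 then p else if p % 2 = 0 then 4 else 3

lemma pvNormP_bounds (p : Int) : -1 ≤ pvNormP p ∧ pvNormP p ≤ 4 := by
  unfold pvNormP; split_ifs <;> omega

lemma flipLoop_neg (fuel : Nat) (btnMap : List (List Int)) (allMask presses : Int)
    (flips : List Int) (h : presses < 0) :
    flipLoop fuel btnMap allMask presses flips = flips := by
  cases fuel with
  | zero => rfl
  | succ k => unfold flipLoop; rw [if_neg (by omega)]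

lemma flipCore_neg (n c c' : Int) (h : c < 0) (h' : c' < 0) :
    flipCore n c = flipCore n c' := by
  unfold flipCore
  dsimp only
  rw [flipLoop_neg _ _ _ _ _ h, flipLoop_neg _ _ _ _ _ h']

lemma cap_eq (p : Int) (h : 0 ≤ p) :
    min p (PySem.Int.mod (p - 1) 2 + 3)
      = min (pvNormP p) (PySem.Int.mod (pvNormP p - 1) 2 + 3) := by
  simp only [PySem.Int.mod_eq_emod_of_pos (show (0:Int) < 2 by norm_num)]
  unfold pvNormP
  split_ifs <;> omega

lemma flipLights_norm (n p : Int) : flipLights n p = flipLights (min n 6) (pvNormP p) := by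
  unfold flipLights
  rw [min_assoc, min_self]
  by_cases hp : 0 ≤ p
  · rw [cap_eq p hp]
  · apply flipCore_neg
    · have h2 : PySem.Int.mod (p - 1) 2 = (p - 1) % 2 :=
        PySem.Int.mod_eq_emod_of_pos (by norm_num)
      omega
    · have h2 : PySem.Int.mod (pvNormP p - 1) 2 = (pvNormP p - 1) % 2 :=
        PySem.Int.mod_eq_emod_of_pos (by norm_num)
      unfold pvNormP
      rw [if_pos (by omega)]
      unfold pvNormP at h2
      rw [if_pos (by omega)] at h2
      omega

lemma flipLights_alt_norm (n p : Int) (hn : 1 ≤ n) :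
    flipLights_alt n p = flipLights_alt (min n 6) (pvNormP p) := by
  have hm : min (min n 6) 3 = min n 3 := by omega
  unfold flipLights_alt
  rw [hm]
  dsimp only
  unfold pvNormP
  split_ifs <;> omega

lemma flipLights_eq_alt_small (m q : Int) (hm1 : 1 ≤ m) (hm6 : m ≤ 6)
    (hq1 : -1 ≤ q) (hq4 : q ≤ 4) : flipLights m q = flipLights_alt m q := by
  interval_cases m <;> interval_cases q <;> decide

-- ===== VERDICT (by name: the statement is the Claim_ definition above) =====
theorem flipLights_spec : Claim_equal_flipLights := by
  intro n p _ hpre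
  unfold Spec_flipLights
  have hpre' : (1:Int) ≤ n := hpre
  rw [flipLights_norm n p, flipLights_alt_norm n p hpre']
  have hb := pvNormP_bounds p
  exact flipLights_eq_alt_small _ _ (by omega) (by omega) hb.1 hb.2
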